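-- pv_equiv track=rewrite | github.com/uumar421/Burrows-Wheeler-Aligner- | BWA.py | process
-- ===== SOURCE A (Python) =====
-- def process(jumb_str):
--     word_dict={}
--     jumb_list=[0]*len(jumb_str)
--
--     for i,c in enumerate(jumb_str):
--         if c not in word_dict:
--             word_dict[c]=0
--         else:
--             word_dict[c]+=1
--         jumb_list[i]=word_dict[c]
--     return jumb_list
-- ===== SOURCE B (Python) =====
-- def process(jumb_str):
--     # Build an index: each character -> list of positions where it occurs.
--     positions = {}
--     for i, c in enumerate(jumb_str):
--         positions.setdefault(c, []).append(i)
--     # Write each position's rank within its character group into the result.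
--     jumb_list = [0] * len(jumb_str)
--     for ps in positions.values():
--         for rank, p in enumerate(ps):
--             jumb_list[p] = rank
--     return jumb_list
-- ===== Notes on version B (the rewrite author's own statement) =====
-- stated objective: alternative
-- what changed: Replaces the single running-count pass (dict of counters updated per character) by a two-phase build-an-index-then-assign structure: first group all positions by character, then write each position's enumeration rank within its group into a preallocated result.
import Mathlib
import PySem

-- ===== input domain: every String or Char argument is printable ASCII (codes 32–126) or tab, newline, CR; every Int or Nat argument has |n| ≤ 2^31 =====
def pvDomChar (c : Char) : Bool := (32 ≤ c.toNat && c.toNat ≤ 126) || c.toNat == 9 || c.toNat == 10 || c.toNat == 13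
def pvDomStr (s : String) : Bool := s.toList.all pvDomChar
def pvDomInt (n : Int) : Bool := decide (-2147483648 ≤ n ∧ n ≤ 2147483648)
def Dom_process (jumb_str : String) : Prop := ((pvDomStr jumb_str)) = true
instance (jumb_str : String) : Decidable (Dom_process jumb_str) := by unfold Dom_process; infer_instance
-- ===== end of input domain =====

-- B replaces A's single running-count pass by building a positions-by-character index
-- first and then writing each position's rank within its group (objective: alternative).

-- ===== PORT A =====
-- one loop step: update the running counter for c, then write it at index i
def pvStepA (st : PySem.Dict Char Int × List Int) (ic : Int × Char) :
    PySem.Dict Char Int × List Int :=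
  let d := st.1
  let d' := if d.contains ic.2 then d.insert ic.2 (d.getD ic.2 0 + 1)   -- word_dict[c] += 1
            else d.insert ic.2 0                                        -- word_dict[c] = 0
  (d', PySem.List.pySetD st.2 ic.1 (d'.getD ic.2 0))                    -- jumb_list[i] = word_dict[c]

def process (jumb_str : String) : List Int :=
  let s := jumb_str.toList
  ((PySem.List.enumerate s 0).foldl pvStepA
    (PySem.Dict.empty, List.replicate s.length 0)).2

-- ===== PORT B =====
-- inner loop of phase 2: write each position's rank within its group
def pvWriteGroup (out : List Int) (ps : List Int) : List Int :=
  (PySem.List.enumerate ps 0).foldl (fun out rp => PySem.List.pySetD out rp.2 rp.1) out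

def process_alt (jumb_str : String) : List Int :=
  let s := jumb_str.toList
  -- phase 1: positions.setdefault(c, []).append(i)
  let positions : PySem.Dict Char (List Int) :=
    (PySem.List.enumerate s 0).foldl (fun d ic => d.modify ic.2 [] (· ++ [ic.1]))
      PySem.Dict.empty
  -- phase 2: per-group rank writes into the preallocated result
  positions.values.foldl pvWriteGroup (List.replicate s.length 0)

-- ===== PRECONDITION & SPEC =====
def Spec_process (jumb_str : String) (out : List Int) : Prop := out = process_alt jumb_str
instance (jumb_str : String) (out : List Int) : Decidable (Spec_process jumb_str out) := by unfold Spec_process; infer_instance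

-- ===== CLAIM (what is proved, stated in full; the proofs are below) =====
def Claim_equal_process : Prop := ∀ (jumb_str : String), Dom_process jumb_str → Spec_process jumb_str (process jumb_str)

-- ===== LEMMAS AND PROOFS =====


-- running-occurrence spec: entries for cs, with p the already-processed prefix
def pvSpec (p cs : List Char) : List Int :=
  match cs with
  | [] => []
  | c :: cs' => ((p.count c : Int)) :: pvSpec (p ++ [c]) cs'

theorem pvSpec_length (cs : List Char) : ∀ p, (pvSpec p cs).length = cs.length := by
  induction cs with
  | nil => intro p; rfl
  | cons c cs ih => intro p; simp [pvSpec, ih]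

theorem pvSpec_getElem? (cs : List Char) : ∀ (p : List Char) (j : Nat) (h : j < cs.length),
    (pvSpec p cs)[j]? = some (((p ++ cs.take j).count cs[j] : Int)) := by
  induction cs with
  | nil => intro p j h; simp at h
  | cons c cs ih =>
    intro p j h
    cases j with
    | zero => simp [pvSpec]
    | succ j =>
      simp only [pvSpec, List.getElem?_cons_succ, List.take_succ_cons, List.getElem_cons_succ]
      rw [ih (p ++ [c]) j (by simpa using h)]
      simp [List.append_assoc]

-- ===== A-side invariant =====
theorem pvA_inv (cs : List Char) : ∀ (p : List Char) (d : PySem.Dict Char Int) (outp : List Int),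
    outp.length = p.length →
    (∀ c, d.get? c = if p.count c = 0 then none else some ((p.count c : Int) - 1)) →
    ((PySem.List.enumerate cs (p.length : Int)).foldl pvStepA
        (d, outp ++ List.replicate cs.length 0)).2 = outp ++ pvSpec p cs := by
  induction cs with
  | nil => intro p d outp _ _; simp [pvSpec, PySem.List.enumerate]
  | cons c cs ih =>
    intro p d outp hlen hd
    rw [PySem.List.enumerate_cons, List.foldl_cons]
    have hcont : d.contains c = (decide (p.count c ≠ 0)) := by
      rw [PySem.Dict.contains_eq_isSome_get?, hd c]
      by_cases h : p.count c = 0 <;> simp [h]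
    have hstep : pvStepA (d, outp ++ List.replicate (c :: cs).length 0) ((p.length : Int), c)
        = (d.insert c ((p.count c : Int)), outp ++ ((p.count c : Int)) :: List.replicate cs.length 0) := by
      unfold pvStepA
      simp only [hcont]
      by_cases h : p.count c = 0
      · simp only [h, decide_eq_true_eq]
        simp [PySem.Dict.getD_insert_self, List.replicate_succ, ← hlen,
          PySem.List.pySetD_natCast]
      · have hget : d.getD c 0 = (p.count c : Int) - 1 := by
          rw [PySem.Dict.getD_eq_get?_getD, hd c, if_neg h]; rfl
        simp only [h, decide_not, Bool.not_eq_true']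
        simp [hget, PySem.Dict.getD_insert_self, List.replicate_succ, ← hlen,
          PySem.List.pySetD_natCast]
    rw [hstep]
    have hd' : ∀ c', (d.insert c ((p.count c : Int))).get? c'
        = if (p ++ [c]).count c' = 0 then none else some (((p ++ [c]).count c' : Int) - 1) := by
      intro c'
      rw [PySem.Dict.get?_insert]
      by_cases hc : c' = c
      · subst hc
        simp [List.count_append]
      · rw [if_neg hc, hd c']
        have : (p ++ [c]).count c' = p.count c' := by
          simp [List.count_append, Ne.symm hc]
        rw [this]
    have := ih (p ++ [c]) (d.insert c ((p.count c : Int))) (outp ++ [(p.count c : Int)])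
      (by simp [hlen]) hd'
    simp only [List.length_append, List.length_cons, List.length_nil, List.append_assoc,
      List.singleton_append, Nat.cast_add, Nat.cast_one] at this
    rw [show ((p.length : Int) + 1) = ((p.length + 1 : Nat) : Int) by push_cast; ring] at *
    simpa [pvSpec, List.append_assoc] using this

theorem pvA_eq (js : String) : process js = pvSpec [] js.toList := by
  unfold process
  have := pvA_inv js.toList [] PySem.Dict.empty [] rfl (by intro c; simp)
  simpa using this

-- ===== B-side: positions of c in cs, as written by phase 1 =====
def pvOccs : List Char → Int → Char → List Int
  | [], _, _ => []
  | x :: xs, k, c => (if x = c then [k] else []) ++ pvOccs xs (k + 1) c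

theorem pvOccs_mem' (cs : List Char) : ∀ (k : Int) (c : Char) (i : Int),
    i ∈ pvOccs cs k c → ∃ j : Nat, ∃ h : j < cs.length, i = k + j ∧ cs[j] = c := by
  induction cs with
  | nil => intro k c i h; simp [pvOccs] at h
  | cons x xs ih =>
    intro k c i h
    simp only [pvOccs, List.mem_append] at h
    rcases h with h | h
    · have hx : x = c ∧ i = k := by
        by_cases hc : x = c
        · simp [hc] at h; exact ⟨hc, h⟩
        · simp [hc] at h
      exact ⟨0, by simp, by simpa using hx.2, by simpa using hx.1⟩
    · obtain ⟨j, hj, hi, hc⟩ := ih (k + 1) c i h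
      exact ⟨j + 1, by simpa using hj, by push_cast; omega, by simpa using hc⟩

theorem pvOccs_sorted (cs : List Char) : ∀ (k : Int) (c : Char),
    (pvOccs cs k c).Pairwise (· < ·) := by
  induction cs with
  | nil => intro k c; simp [pvOccs]
  | cons x xs ih =>
    intro k c
    have hb : ∀ i ∈ pvOccs xs (k + 1) c, k < i := by
      intro i hi
      obtain ⟨j, hj, hij, _⟩ := pvOccs_mem' xs (k + 1) c i hi
      omega
    by_cases hc : x = c
    · simpa [pvOccs, hc, List.pairwise_cons] using ⟨hb, ih (k + 1) c⟩
    · simpa [pvOccs, hc] using ih (k + 1) c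

theorem pvOccs_rank (cs : List Char) : ∀ (j : Nat) (h : j < cs.length) (k : Int) (c : Char),
    cs[j] = c → (pvOccs cs k c)[(cs.take j).count c]? = some (k + j) := by
  induction cs with
  | nil => intro j h; simp at h
  | cons x xs ih =>
    intro j h k c hj
    cases j with
    | zero =>
      simp only [List.getElem_cons_zero] at hj
      simp [pvOccs, hj]
    | succ j =>
      simp only [List.getElem_cons_succ] at hj
      have hcount : ((x :: xs).take (j + 1)).count c
          = (xs.take j).count c + if x == c then 1 else 0 := by
        simp [List.take_succ_cons, List.count_cons]
      by_cases hc : x = c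
      · rw [hcount, if_pos (beq_iff_eq.mpr hc)]
        simp only [pvOccs, if_pos hc, List.singleton_append, List.getElem?_cons_succ]
        rw [ih j (by simpa using h) (k + 1) c hj]
        congr 1
        push_cast
        ring
      · rw [hcount, if_neg (by simp [hc]), Nat.add_zero]
        simp only [pvOccs, if_neg hc, List.nil_append]
        rw [ih j (by simpa using h) (k + 1) c hj]
        congr 1
        push_cast
        ring

-- phase 1 characterization
theorem pvEnumFilter (cs : List Char) : ∀ (k : Int) (c : Char),
    (((PySem.List.enumerate cs k).filter (fun ic => ic.2 == c)).map (·.1)) = pvOccs cs k c := by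
  induction cs with
  | nil => intro k c; simp [PySem.List.enumerate, pvOccs]
  | cons x xs ih =>
    intro k c
    rw [PySem.List.enumerate_cons]
    by_cases hc : x = c
    · simp [hc, pvOccs, ih]
    · simp [hc, pvOccs, ih]

theorem pvPosGetD (s : List Char) (c : Char) :
    (((PySem.List.enumerate s 0).foldl (fun d ic => d.modify ic.2 [] (· ++ [ic.1]))
        (PySem.Dict.empty : PySem.Dict Char (List Int)))).getD c [] = pvOccs s 0 c := by
  have h := PySem.Dict.getD_foldl_modify_append ((PySem.List.enumerate s 0).map Prod.swap)
    (PySem.Dict.empty : PySem.Dict Char (List Int)) c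
  rw [List.foldl_map] at h
  simp only [Prod.fst_swap, Prod.snd_swap] at h
  rw [h]
  simp only [PySem.Dict.getD_empty, List.nil_append, List.filter_map, List.map_map,
    Function.comp_def, Prod.swap]
  exact pvEnumFilter s 0 c

theorem pvPosValues (s : List Char) :
    (((PySem.List.enumerate s 0).foldl (fun d ic => d.modify ic.2 [] (· ++ [ic.1]))
        (PySem.Dict.empty : PySem.Dict Char (List Int)))).values
      = (PySem.Set.ofList s).map (fun c => pvOccs s 0 c) := by
  have hkeys : (((PySem.List.enumerate s 0).foldl (fun d ic => d.modify ic.2 [] (· ++ [ic.1]))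
      (PySem.Dict.empty : PySem.Dict Char (List Int)))).keys = PySem.Set.ofList s := by
    have h := PySem.Dict.keys_foldl_modify_key (PySem.List.enumerate s 0)
      (fun ic => ic.2) [] (fun d ic v => v ++ [ic.1])
      (PySem.Dict.empty : PySem.Dict Char (List Int))
    simpa [PySem.Dict.keys_empty, PySem.Set.update_nil_left,
      PySem.List.map_snd_enumerate] using h
  have hnodup : (((PySem.List.enumerate s 0).foldl (fun d ic => d.modify ic.2 [] (· ++ [ic.1]))
      (PySem.Dict.empty : PySem.Dict Char (List Int)))).keys.Nodup :=
    PySem.Dict.nodup_keys_foldl_modify_key (PySem.List.enumerate s 0)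
      (fun ic => ic.2) [] (fun d ic v => v ++ [ic.1]) PySem.Dict.empty
      (by simp [PySem.Dict.keys_empty])
  rw [PySem.Dict.values_eq_map_keys _ hnodup [], hkeys]
  exact List.map_congr_left (fun c _ => pvPosGetD s c)

-- ===== phase 2: rank writes =====
theorem pvWrite_length (ps : List Int) : ∀ (st : Int) (out : List Int),
    ((PySem.List.enumerate ps st).foldl
        (fun out rp => PySem.List.pySetD out rp.2 rp.1) out).length = out.length := by
  induction ps with
  | nil => intro st out; simp [PySem.List.enumerate]
  | cons p ps ih =>
    intro st out
    rw [PySem.List.enumerate_cons, List.foldl_cons]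
    rw [ih]
    exact PySem.List.length_pySetD out p st

theorem pvWrite_untouched (ps : List Int) : ∀ (st : Int) (out : List Int) (j : Nat),
    (∀ i ∈ ps, 0 ≤ i) → ((j : Int) ∉ ps) →
    ((PySem.List.enumerate ps st).foldl
        (fun out rp => PySem.List.pySetD out rp.2 rp.1) out)[j]? = out[j]? := by
  induction ps with
  | nil => intro st out j _ _; simp [PySem.List.enumerate]
  | cons p ps ih =>
    intro st out j hnn hj
    rw [PySem.List.enumerate_cons, List.foldl_cons]
    rw [ih (st + 1) _ j (fun i hi => hnn i (List.mem_cons_of_mem _ hi))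
      (fun h => hj (List.mem_cons_of_mem _ h))]
    rw [PySem.List.pySetD_of_nonneg out st (hnn p (List.mem_cons_self ..))]
    rw [List.getElem?_set]
    rw [if_neg]
    intro hpj
    have hp0 : 0 ≤ p := hnn p (List.mem_cons_self ..)
    have hpj' : p = (j : Int) := by omega
    exact hj (hpj' ▸ List.mem_cons_self ..)

theorem pvWrite_rank (ps : List Int) : ∀ (r0 : Nat) (st : Int) (out : List Int) (j : Nat),
    ps.Pairwise (· < ·) → (∀ i ∈ ps, 0 ≤ i) → ps[r0]? = some ((j : Int)) →
    j < out.length →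
    ((PySem.List.enumerate ps st).foldl
        (fun out rp => PySem.List.pySetD out rp.2 rp.1) out)[j]? = some (st + r0) := by
  induction ps with
  | nil => intro r0 st out j _ _ hr _; simp at hr
  | cons p ps ih =>
    intro r0 st out j hpw hnn hr hjl
    rw [PySem.List.enumerate_cons, List.foldl_cons]
    have hp0 : 0 ≤ p := hnn p (List.mem_cons_self ..)
    cases r0 with
    | zero =>
      simp only [List.getElem?_cons_zero, Option.some.injEq] at hr
      have hnotin : ((j : Int)) ∉ ps := by
        intro hmem
        have := (List.pairwise_cons.mp hpw).1 _ hmem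
        omega
      rw [pvWrite_untouched ps (st + 1) _ j
        (fun i hi => hnn i (List.mem_cons_of_mem _ hi)) hnotin]
      dsimp only
      rw [PySem.List.pySetD_of_nonneg out st hp0]
      rw [List.getElem?_set]
      have hpj : p.toNat = j := by omega
      rw [if_pos hpj, if_pos (show p.toNat < out.length by omega)]
      simp
    | succ r0 =>
      simp only [List.getElem?_cons_succ] at hr
      have hmem : ((j : Int)) ∈ ps := List.mem_of_getElem? hr
      have hpj : p < (j : Int) := (List.pairwise_cons.mp hpw).1 _ hmem
      have := ih r0 (st + 1) (PySem.List.pySetD out p st) j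
        (List.pairwise_cons.mp hpw).2 (fun i hi => hnn i (List.mem_cons_of_mem _ hi)) hr
        (by rw [PySem.List.length_pySetD]; exact hjl)
      rw [this]
      congr 1
      push_cast
      ring

-- the outer loop over groups whose character differs from s[j] never touches j
theorem pvOuter_untouched (ks : List Char) (s : List Char) (j : Nat) (h : j < s.length) :
    ∀ (out : List Int), s[j] ∉ ks →
    (ks.foldl (fun o c => pvWriteGroup o (pvOccs s 0 c)) out)[j]? = out[j]? := by
  induction ks with
  | nil => intro out _; rfl
  | cons k ks ih =>
    intro out hk
    rw [List.foldl_cons]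
    rw [ih _ (fun hmem => hk (List.mem_cons_of_mem _ hmem))]
    unfold pvWriteGroup
    apply pvWrite_untouched
    · intro i hi
      obtain ⟨j', _, hij, _⟩ := pvOccs_mem' s 0 k i hi
      omega
    · intro hmem
      obtain ⟨j', hj', hij, hc⟩ := pvOccs_mem' s 0 k _ hmem
      have : j' = j := by omega
      subst this
      exact hk (hc ▸ List.mem_cons_self ..)

theorem pvOuter_mem (ks : List Char) (s : List Char) (j : Nat) (h : j < s.length) :
    ∀ (out : List Int), out.length = s.length → ks.Nodup → s[j] ∈ ks →
    (ks.foldl (fun o c => pvWriteGroup o (pvOccs s 0 c)) out)[j]?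
      = some (((s.take j).count s[j] : Int)) := by
  induction ks with
  | nil => intro out _ _ hk; simp at hk
  | cons k ks ih =>
    intro out hlen hnd hk
    rw [List.foldl_cons]
    by_cases hks : k = s[j]
    · have hnotin : s[j] ∉ ks := hks ▸ (List.nodup_cons.mp hnd).1
      rw [pvOuter_untouched ks s j h _ hnotin]
      unfold pvWriteGroup
      have hrank := pvOccs_rank s j h 0 k hks.symm
      rw [zero_add] at hrank
      rw [pvWrite_rank (pvOccs s 0 k) ((s.take j).count k) 0 out j
        (pvOccs_sorted s 0 k)
        (fun i hi => by obtain ⟨j', _, hij, _⟩ := pvOccs_mem' s 0 k i hi; omega)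
        hrank (hlen ▸ h)]
      rw [hks]
      simp
    · have hk' : s[j] ∈ ks := by
        rcases List.mem_cons.mp hk with h1 | h1
        · exact absurd h1.symm hks
        · exact h1
      rw [ih _ (by unfold pvWriteGroup; rw [pvWrite_length]; exact hlen)
        (List.nodup_cons.mp hnd).2 hk']

theorem pvOuter_length (s : List Char) (ks : List Char) : ∀ (out : List Int),
    (ks.foldl (fun o c => pvWriteGroup o (pvOccs s 0 c)) out).length = out.length := by
  induction ks with
  | nil => intro out; rfl
  | cons k ks ih =>
    intro out
    rw [List.foldl_cons, ih]
    unfold pvWriteGroup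
    exact pvWrite_length _ _ _

theorem pvB_eq (js : String) : process_alt js = pvSpec [] js.toList := by
  show (((PySem.List.enumerate js.toList 0).foldl
      (fun d ic => d.modify ic.2 [] (· ++ [ic.1]))
      (PySem.Dict.empty : PySem.Dict Char (List Int)))).values.foldl pvWriteGroup
      (List.replicate js.toList.length 0) = pvSpec [] js.toList
  rw [pvPosValues js.toList, List.foldl_map]
  apply List.ext_getElem
  · rw [pvOuter_length]
    simp [pvSpec_length]
  · intro i h1 h2
    have hi : i < js.toList.length := by
      rw [pvOuter_length] at h1
      simpa using h1
    have hmem : js.toList[i] ∈ PySem.Set.ofList js.toList :=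
      (PySem.Set.mem_ofList _ _).mpr (List.getElem_mem hi)
    have hL := pvOuter_mem (PySem.Set.ofList js.toList) js.toList i hi
      (List.replicate js.toList.length 0) (by simp)
      (PySem.Set.nodup_ofList _) hmem
    have hR := pvSpec_getElem? js.toList [] i hi
    rw [List.nil_append] at hR
    have hL' := List.getElem?_eq_getElem h1
    have hR' := List.getElem?_eq_getElem h2
    rw [hL'] at hL
    rw [hR'] at hR
    exact Option.some.inj (hL.trans hR.symm)

-- ===== VERDICT (by name: the statement is the Claim_ definition above) =====
theorem process_spec : Claim_equal_process := by
  intro js _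
  unfold Spec_process
  rw [pvA_eq, pvB_eq]
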